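-- pv_equiv track=rewrite | github.com/ptigroup/deepfin | brownfield/data/dump/09252025/legacy_parsers/direct_cash_flow_parser.py | categorize_cash_flow_account
-- ===== SOURCE A (Python) =====
-- def categorize_cash_flow_account(account_name: str, current_activity: str) -> str:
--     """Categorize cash flow account based on name and activity."""
--     name_lower = account_name.lower()
--
--     # Operating activity categories
--     if current_activity == "operating":
--         if "net income" in name_lower:
--             return "net_income"
--         elif any(keyword in name_lower for keyword in ["depreciation", "amortization"]):
--             return "depreciation_amortization"
--         elif "stock-based" in name_lower or "share-based" in name_lower:
--             return "stock_compensation"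
--         elif any(keyword in name_lower for keyword in ["receivable", "inventory", "payable", "accrued"]):
--             return "working_capital_change"
--         else:
--             return "operating_adjustment"
--
--     # Investing activity categories
--     elif current_activity == "investing":
--         if any(keyword in name_lower for keyword in ["expenditure", "capex", "property", "equipment"]):
--             return "capital_expenditure"
--         elif any(keyword in name_lower for keyword in ["acquisition", "purchase", "investment"]):
--             return "acquisition"
--         elif "proceeds" in name_lower:
--             return "asset_disposal"
--         else:
--             return "investing_activity"
--
--     # Financing activity categories
--     elif current_activity == "financing":
--         if any(keyword in name_lower for keyword in ["repurchase", "buyback"]):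
--             return "share_repurchase"
--         elif "dividend" in name_lower:
--             return "dividend_payment"
--         elif any(keyword in name_lower for keyword in ["borrowing", "debt", "loan"]):
--             return "debt_activity"
--         elif "issuance" in name_lower:
--             return "equity_issuance"
--         else:
--             return "financing_activity"
--
--     # Supplemental and reconciliation
--     elif current_activity == "supplemental":
--         return "supplemental_info"
--
--     else:
--         return "cash_reconciliation"
-- ===== SOURCE B (Python) =====
-- # One flat, priority-ordered list of (activity, keyword, category) triples;
-- # a single linear scan replaces the per-activity branch cascade with grouped
-- # any() tests.  Expanding each keyword group into consecutive triples is
-- # correct because all keywords of a group map to the same category, so the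
-- # first matching triple yields exactly the first matching group's category.
--
-- _RULES = [
--     ("operating", "net income", "net_income"),
--     ("operating", "depreciation", "depreciation_amortization"),
--     ("operating", "amortization", "depreciation_amortization"),
--     ("operating", "stock-based", "stock_compensation"),
--     ("operating", "share-based", "stock_compensation"),
--     ("operating", "receivable", "working_capital_change"),
--     ("operating", "inventory", "working_capital_change"),
--     ("operating", "payable", "working_capital_change"),
--     ("operating", "accrued", "working_capital_change"),
--     ("investing", "expenditure", "capital_expenditure"),
--     ("investing", "capex", "capital_expenditure"),
--     ("investing", "property", "capital_expenditure"),
--     ("investing", "equipment", "capital_expenditure"),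
--     ("investing", "acquisition", "acquisition"),
--     ("investing", "purchase", "acquisition"),
--     ("investing", "investment", "acquisition"),
--     ("investing", "proceeds", "asset_disposal"),
--     ("financing", "repurchase", "share_repurchase"),
--     ("financing", "buyback", "share_repurchase"),
--     ("financing", "dividend", "dividend_payment"),
--     ("financing", "borrowing", "debt_activity"),
--     ("financing", "debt", "debt_activity"),
--     ("financing", "loan", "debt_activity"),
--     ("financing", "issuance", "equity_issuance"),
-- ]
--
-- _DEFAULTS = {
--     "operating": "operating_adjustment",
--     "investing": "investing_activity",
--     "financing": "financing_activity",
--     "supplemental": "supplemental_info",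
-- }
--
--
-- def categorize_cash_flow_account(account_name: str, current_activity: str) -> str:
--     """Categorize cash flow account based on name and activity."""
--     name_lower = account_name.lower()
--     for activity, keyword, category in _RULES:
--         if activity == current_activity and keyword in name_lower:
--             return category
--     return _DEFAULTS.get(current_activity, "cash_reconciliation")
-- ===== Notes on version B (the rewrite author's own statement) =====
-- stated objective: alternative
-- what changed: Flattens A's per-activity if/elif cascade with grouped any() keyword tests into one flat priority-ordered list of (activity, keyword, category) triples scanned by a single loop, with a separate defaults dict; correct because all keywords of a group share one category, so first-match over the expanded triples equals first-match over the groups.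
import Mathlib
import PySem

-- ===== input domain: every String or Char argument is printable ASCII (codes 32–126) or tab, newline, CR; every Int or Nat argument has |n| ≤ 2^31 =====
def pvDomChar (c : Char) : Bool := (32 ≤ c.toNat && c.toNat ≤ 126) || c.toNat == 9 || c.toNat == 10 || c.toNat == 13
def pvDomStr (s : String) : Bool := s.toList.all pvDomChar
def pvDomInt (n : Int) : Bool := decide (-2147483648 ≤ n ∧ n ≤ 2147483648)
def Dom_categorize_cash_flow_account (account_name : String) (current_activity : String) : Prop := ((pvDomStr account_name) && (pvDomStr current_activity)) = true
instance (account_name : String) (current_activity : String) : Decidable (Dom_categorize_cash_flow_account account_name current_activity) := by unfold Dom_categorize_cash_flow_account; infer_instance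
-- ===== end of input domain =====

-- B replaces A's per-activity branch cascade (grouped any() keyword tests) with one flat,
-- priority-ordered list of (activity, keyword, category) triples scanned by a single loop;
-- idiomatic/alternative decomposition, same cost.


-- ===== PORT A =====
def categorize_cash_flow_account (account_name : String) (current_activity : String) : String :=
  let name_lower := PySem.Str.lower account_name
  if current_activity == "operating" then
    if PySem.Str.isIn "net income" name_lower then "net_income"
    else if ["depreciation", "amortization"].any (fun k => PySem.Str.isIn k name_lower) then "depreciation_amortization"
    else if PySem.Str.isIn "stock-based" name_lower || PySem.Str.isIn "share-based" name_lower then "stock_compensation"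
    else if ["receivable", "inventory", "payable", "accrued"].any (fun k => PySem.Str.isIn k name_lower) then "working_capital_change"
    else "operating_adjustment"
  else if current_activity == "investing" then
    if ["expenditure", "capex", "property", "equipment"].any (fun k => PySem.Str.isIn k name_lower) then "capital_expenditure"
    else if ["acquisition", "purchase", "investment"].any (fun k => PySem.Str.isIn k name_lower) then "acquisition"
    else if PySem.Str.isIn "proceeds" name_lower then "asset_disposal"
    else "investing_activity"
  else if current_activity == "financing" then
    if ["repurchase", "buyback"].any (fun k => PySem.Str.isIn k name_lower) then "share_repurchase"
    else if PySem.Str.isIn "dividend" name_lower then "dividend_payment"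
    else if ["borrowing", "debt", "loan"].any (fun k => PySem.Str.isIn k name_lower) then "debt_activity"
    else if PySem.Str.isIn "issuance" name_lower then "equity_issuance"
    else "financing_activity"
  else if current_activity == "supplemental" then "supplemental_info"
  else "cash_reconciliation"

-- ===== PORT B =====
-- the module-level flat _RULES list of Source B: (activity, keyword, category) triples in priority order
def pvRules : List (String × String × String) :=
  [ ("operating", "net income", "net_income"),
    ("operating", "depreciation", "depreciation_amortization"),
    ("operating", "amortization", "depreciation_amortization"),
    ("operating", "stock-based", "stock_compensation"),
    ("operating", "share-based", "stock_compensation"),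
    ("operating", "receivable", "working_capital_change"),
    ("operating", "inventory", "working_capital_change"),
    ("operating", "payable", "working_capital_change"),
    ("operating", "accrued", "working_capital_change"),
    ("investing", "expenditure", "capital_expenditure"),
    ("investing", "capex", "capital_expenditure"),
    ("investing", "property", "capital_expenditure"),
    ("investing", "equipment", "capital_expenditure"),
    ("investing", "acquisition", "acquisition"),
    ("investing", "purchase", "acquisition"),
    ("investing", "investment", "acquisition"),
    ("investing", "proceeds", "asset_disposal"),
    ("financing", "repurchase", "share_repurchase"),
    ("financing", "buyback", "share_repurchase"),
    ("financing", "dividend", "dividend_payment"),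
    ("financing", "borrowing", "debt_activity"),
    ("financing", "debt", "debt_activity"),
    ("financing", "loan", "debt_activity"),
    ("financing", "issuance", "equity_issuance") ]

-- the module-level _DEFAULTS dict of Source B
def pvDefaults : PySem.Dict String String :=
  PySem.Dict.ofList
    [ ("operating", "operating_adjustment"),
      ("investing", "investing_activity"),
      ("financing", "financing_activity"),
      ("supplemental", "supplemental_info") ]

-- Source B's 'for activity, keyword, category in _RULES: …' loop; falls through to the default
def pvScan (current_activity name_lower : String) : List (String × String × String) → String → String
  | [], dflt => dflt
  | (activity, keyword, category) :: rest, dflt =>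
    if activity == current_activity && PySem.Str.isIn keyword name_lower then category
    else pvScan current_activity name_lower rest dflt

def categorize_cash_flow_account_alt (account_name : String) (current_activity : String) : String :=
  let name_lower := PySem.Str.lower account_name
  pvScan current_activity name_lower pvRules
    (PySem.Dict.getD pvDefaults current_activity "cash_reconciliation")

-- ===== PRECONDITION & SPEC =====
def Spec_categorize_cash_flow_account (account_name : String) (current_activity : String) (out : String) : Prop := out = categorize_cash_flow_account_alt account_name current_activity
instance (account_name : String) (current_activity : String) (out : String) : Decidable (Spec_categorize_cash_flow_account account_name current_activity out) := by unfold Spec_categorize_cash_flow_account; infer_instance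

-- ===== CLAIM (what is proved, stated in full; the proofs are below) =====
def Claim_equal_categorize_cash_flow_account : Prop := ∀ (account_name : String) (current_activity : String), Dom_categorize_cash_flow_account account_name current_activity → Spec_categorize_cash_flow_account account_name current_activity (categorize_cash_flow_account account_name current_activity)

-- ===== LEMMAS AND PROOFS =====

-- the defaults dict evaluated at the four known keys
theorem pvDefaults_op : PySem.Dict.getD pvDefaults "operating" "cash_reconciliation" = "operating_adjustment" := by rfl
theorem pvDefaults_inv : PySem.Dict.getD pvDefaults "investing" "cash_reconciliation" = "investing_activity" := by rfl
theorem pvDefaults_fin : PySem.Dict.getD pvDefaults "financing" "cash_reconciliation" = "financing_activity" := by rfl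
theorem pvDefaults_sup : PySem.Dict.getD pvDefaults "supplemental" "cash_reconciliation" = "supplemental_info" := by rfl

-- a grouped 'or' test equals the expanded one-keyword-per-step chain
theorem pvOrIte (x y : Bool) (r t : String) :
    (if (x || y) = true then r else t) = if x = true then r else if y = true then r else t := by
  cases x <;> simp

-- ===== VERDICT (by name: the statement is the Claim_ definition above) =====
theorem categorize_cash_flow_account_spec : Claim_equal_categorize_cash_flow_account := by
  intro account_name current_activity _
  unfold Spec_categorize_cash_flow_account categorize_cash_flow_account categorize_cash_flow_account_alt
  by_cases h1 : current_activity = "operating"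
  · subst h1
    simp only [pvScan, pvRules, pvDefaults_op, List.any_cons, List.any_nil,
      Bool.or_false, beq_self_eq_true, Bool.true_and, String.reduceBEq,
      Bool.false_and, Bool.false_eq_true, if_false, if_true, pvOrIte]
  by_cases h2 : current_activity = "investing"
  · subst h2
    simp only [pvScan, pvRules, pvDefaults_inv, List.any_cons, List.any_nil,
      Bool.or_false, beq_self_eq_true, Bool.true_and, String.reduceBEq,
      Bool.false_and, Bool.false_eq_true, if_false, if_true, pvOrIte]
  by_cases h3 : current_activity = "financing"
  · subst h3
    simp only [pvScan, pvRules, pvDefaults_fin, List.any_cons, List.any_nil,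
      Bool.or_false, beq_self_eq_true, Bool.true_and, String.reduceBEq,
      Bool.false_and, Bool.false_eq_true, if_false, if_true, pvOrIte]
  by_cases h4 : current_activity = "supplemental"
  · subst h4
    simp only [pvScan, pvRules, pvDefaults_sup, String.reduceBEq, Bool.false_and,
      Bool.false_eq_true, if_false, if_true]
  · have e1 : ("operating" == current_activity) = false := by simp [Ne.symm h1]
    have e2 : ("investing" == current_activity) = false := by simp [Ne.symm h2]
    have e3 : ("financing" == current_activity) = false := by simp [Ne.symm h3]
    have e4 : ("supplemental" == current_activity) = false := by simp [Ne.symm h4]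
    simp [pvScan, pvRules, pvDefaults, PySem.Dict.getD, PySem.Dict.ofList,
      PySem.Dict.update, PySem.Dict.insert, PySem.Dict.empty,
      PySem.Dict.get?, List.find?, List.foldl, h1, h2, h3, h4, e1, e2, e3, e4]
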